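-- pv_equiv track=rewrite | github.com/sumanbanerjee1/Code-Mixed-Dialog | code/hred/preprocess.py | locate_kb
-- ===== SOURCE A (Python) =====
-- def locate_kb(content):
--
--     kb_start_found = False
--     start_index = []
--     end_index = []
--
--     for turn_no, current_turn in enumerate(content):
--         if "R_post_code" in current_turn and not kb_start_found:
--             kb_start_found = True
--             start_index.append(turn_no)
--         if kb_start_found:
--             if "<SILENCE>" in current_turn:
--                 end_index.append(turn_no)
--                 kb_start_found = False
--
--     start_index.append(len(content)) #full dialog ease of programming
--     return start_index,end_index
-- ===== SOURCE B (Python) =====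
-- def locate_kb(content):
--     # Precompute the positions of both markers once, then pair them with a
--     # two-pointer merge over the (short) index lists.
--     starts_all = [i for i, t in enumerate(content) if "R_post_code" in t]
--     ends_all = [i for i, t in enumerate(content) if "<SILENCE>" in t]
--     start_index = []
--     end_index = []
--     lo = 0          # first position where a new KB block may start
--     j = 0           # cursor into ends_all
--     for s in starts_all:
--         if s < lo:
--             continue
--         start_index.append(s)
--         while j < len(ends_all) and ends_all[j] < s:
--             j += 1
--         if j < len(ends_all):
--             end_index.append(ends_all[j])
--             lo = ends_all[j] + 1
--             j += 1
--         else: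
--             break   # unclosed block: no further starts are recorded
--     start_index.append(len(content))
--     return start_index, end_index
-- ===== Notes on version B (the rewrite author's own statement) =====
-- stated objective: alternative
-- what changed: Instead of A's single flagged pass over the turns, B first builds the index lists of all R_post_code turns and all <SILENCE> turns, then pairs them with a two-pointer merge over those index lists (skipping starts inside a matched block, taking the first silence at or after each start).
import Mathlib
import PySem

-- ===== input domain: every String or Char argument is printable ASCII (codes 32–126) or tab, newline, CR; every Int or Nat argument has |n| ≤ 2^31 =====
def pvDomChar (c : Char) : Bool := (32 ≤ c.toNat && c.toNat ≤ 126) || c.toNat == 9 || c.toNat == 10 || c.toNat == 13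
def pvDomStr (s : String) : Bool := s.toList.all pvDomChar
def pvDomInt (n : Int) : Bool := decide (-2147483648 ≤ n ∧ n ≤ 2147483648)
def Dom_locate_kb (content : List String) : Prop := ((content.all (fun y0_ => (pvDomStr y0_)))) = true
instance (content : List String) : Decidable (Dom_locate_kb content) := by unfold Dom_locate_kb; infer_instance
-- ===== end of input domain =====

-- B replaces A's single flagged pass with precomputed marker-index lists paired
-- by a two-pointer merge (alternative decomposition, same cost).


-- ===== PORT A =====
-- the for loop over enumerate(content), state (kb_start_found, start_index, end_index)
def locateKbLoopA (rem : List String) (i : Nat) (flag : Bool)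
    (starts ends : List Int) : Bool × List Int × List Int :=
  match rem with
  | [] => (flag, starts, ends)
  | t :: rest =>
    let flag' := if PySem.Str.isIn "R_post_code" t && !flag then true else flag
    let starts' := if PySem.Str.isIn "R_post_code" t && !flag then starts ++ [(i : Int)] else starts
    if flag' then
      if PySem.Str.isIn "<SILENCE>" t then
        locateKbLoopA rest (i + 1) false starts' (ends ++ [(i : Int)])
      else
        locateKbLoopA rest (i + 1) flag' starts' ends
    else
      locateKbLoopA rest (i + 1) flag' starts' ends

def locate_kb (content : List String) : List Int × List Int :=
  let r := locateKbLoopA content 0 false [] []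
  (r.2.1 ++ [(content.length : Int)], r.2.2)

-- ===== PORT B =====
-- [i for i, t in enumerate(content) if marker in t]
def markerIdx (marker : String) (content : List String) : List Int :=
  (PySem.List.enumerate content).filterMap
    (fun p => if PySem.Str.isIn marker p.2 then some p.1 else none)

-- 'while j < len(ends_all) and ends_all[j] < s: j += 1'
def advanceJ (endsAll : List Int) (s : Int) (j : Nat) : Nat :=
  if h : j < endsAll.length then
    if endsAll[j] < s then advanceJ endsAll s (j + 1) else j
  else j
termination_by endsAll.length - j

-- the 'for s in starts_all' merge loop of B, state (lo, j, start_index, end_index)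
def pairLoop (endsAll : List Int) (rem : List Int) (lo : Int) (j : Nat)
    (starts ends : List Int) : List Int × List Int :=
  match rem with
  | [] => (starts, ends)
  | s :: rest =>
    if s < lo then pairLoop endsAll rest lo j starts ends
    else
      let starts' := starts ++ [s]
      let j' := advanceJ endsAll s j
      if h : j' < endsAll.length then
        pairLoop endsAll rest (endsAll[j'] + 1) (j' + 1) starts' (ends ++ [endsAll[j']])
      else (starts', ends)

def locate_kb_alt (content : List String) : List Int × List Int :=
  let r := pairLoop (markerIdx "<SILENCE>" content) (markerIdx "R_post_code" content) 0 0 [] []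
  (r.1 ++ [(content.length : Int)], r.2)

-- ===== PRECONDITION & SPEC =====
def Spec_locate_kb (content : List String) (out : List Int × List Int) : Prop := out = locate_kb_alt content
instance (content : List String) (out : List Int × List Int) : Decidable (Spec_locate_kb content out) := by unfold Spec_locate_kb; infer_instance

-- ===== CLAIM (what is proved, stated in full; the proofs are below) =====
def Claim_equal_locate_kb : Prop := ∀ (content : List String), Dom_locate_kb content → Spec_locate_kb content (locate_kb content)

-- ===== LEMMAS AND PROOFS =====

-- proof-only reference scan: first index ≥ i whose turn contains the marker
def scanFor (marker : String) (content : List String) (i : Nat) : Nat :=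
  if h : i < content.length then
    if PySem.Str.isIn marker content[i] then i else scanFor marker content (i + 1)
  else i
termination_by content.length - i

theorem scanFor_ge (marker : String) (content : List String) (i : Nat) :
    i ≤ scanFor marker content i := by
  unfold scanFor
  split
  · split
    · exact le_refl i
    · exact le_trans (Nat.le_succ i) (scanFor_ge marker content (i + 1))
  · exact le_refl i
termination_by content.length - i

theorem scanFor_le_len (marker : String) (content : List String) (i : Nat)
    (h : i ≤ content.length) : scanFor marker content i ≤ content.length := by
  unfold scanFor
  split
  · split
    · omega
    · exact scanFor_le_len marker content (i + 1) (by omega)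
  · exact h
termination_by content.length - i

theorem scanFor_hit {marker : String} {content : List String} {i : Nat}
    (h : i < content.length) (hm : PySem.Str.isIn marker content[i] = true) :
    scanFor marker content i = i := by
  rw [scanFor]; simp only [PySem.Str.isIn] at hm; simp [h, hm]

theorem scanFor_miss {marker : String} {content : List String} {i : Nat}
    (h : i < content.length) (hm : PySem.Str.isIn marker content[i] = false) :
    scanFor marker content i = scanFor marker content (i + 1) := by
  rw [scanFor]; simp only [PySem.Str.isIn] at hm; simp [h, hm]

theorem scanFor_stop {marker : String} {content : List String} {i : Nat}
    (h : ¬ i < content.length) : scanFor marker content i = i := by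
  unfold scanFor; simp [h]

theorem scanFor_mono_eq (marker : String) (content : List String) (i0 i : Nat)
    (h01 : i0 ≤ i) (h1 : i ≤ scanFor marker content i0) :
    scanFor marker content i = scanFor marker content i0 := by
  rcases Nat.eq_or_lt_of_le h01 with rfl | hlt
  · rfl
  · by_cases hi0 : i0 < content.length
    · by_cases hm : PySem.Str.isIn marker content[i0] = true
      · rw [scanFor_hit hi0 hm] at h1; omega
      · have hm' : PySem.Str.isIn marker content[i0] = false := by simpa using hm
        rw [scanFor_miss hi0 hm'] at h1 ⊢
        exact scanFor_mono_eq marker content (i0 + 1) i hlt h1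
    · rw [scanFor_stop hi0] at h1; omega
termination_by i - i0

-- proof-only reference: the marker indices ≥ i, as naturals
def idxFrom (marker : String) (content : List String) (i : Nat) : List Nat :=
  if h : i < content.length then
    if PySem.Str.isIn marker content[i] then i :: idxFrom marker content (i + 1)
    else idxFrom marker content (i + 1)
  else []
termination_by content.length - i

theorem idxFrom_eq_scan (marker : String) (content : List String) (i : Nat) :
    idxFrom marker content i =
      if scanFor marker content i < content.length then
        scanFor marker content i :: idxFrom marker content (scanFor marker content i + 1)
      else [] := by
  rw [idxFrom]
  by_cases hi : i < content.length
  · by_cases hm : PySem.Str.isIn marker content[i] = true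
    · rw [scanFor_hit hi hm]; simp only [PySem.Str.isIn] at hm; simp [hi, hm]
    · have hm' : PySem.Str.isIn marker content[i] = false := by simpa using hm
      rw [scanFor_miss hi hm']
      simp only [hi, dif_pos, hm', Bool.false_eq_true, if_false]
      exact idxFrom_eq_scan marker content (i + 1)
  · rw [scanFor_stop hi]
    simp [hi]
termination_by content.length - i

-- B's comprehension equals idxFrom at 0 (cast to Int)
theorem markerIdx_eq_aux (marker : String) (content : List String) (i : Nat)
    (h : i ≤ content.length) :
    (PySem.List.enumerate (content.drop i) (i : Int)).filterMap
      (fun p => if PySem.Str.isIn marker p.2 then some p.1 else none) =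
    (idxFrom marker content i).map (fun k => (k : Int)) := by
  by_cases hi : i < content.length
  · rw [List.drop_eq_getElem_cons hi, PySem.List.enumerate_cons, idxFrom]
    have hc : (i : Int) + 1 = ((i + 1 : Nat) : Int) := by push_cast; ring
    rw [List.filterMap_cons, hc, markerIdx_eq_aux marker content (i + 1) (by omega)]
    by_cases hm : PySem.Str.isIn marker content[i] = true
    · have hm2 : PySem.Chars.isIn marker.toList content[i].toList = true := by
        simpa [PySem.Str.isIn] using hm
      simp [PySem.Str.isIn, hm2, hi]
    · have hm2 : PySem.Chars.isIn marker.toList content[i].toList = false := by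
        simpa [PySem.Str.isIn] using hm
      simp [PySem.Str.isIn, hm2, hi]
  · rw [List.drop_eq_nil_of_le (by omega), idxFrom]
    simp [hi, PySem.List.enumerate]
termination_by content.length - i

theorem markerIdx_eq (marker : String) (content : List String) :
    markerIdx marker content = (idxFrom marker content 0).map (fun k => (k : Int)) := by
  have := markerIdx_eq_aux marker content 0 (by omega)
  simpa [markerIdx] using this

-- the inner while loop of B, against the silence scan
theorem advanceJ_spec (content : List String) (E : List Int) :
    ∀ (i j s : Nat), E.drop j = (idxFrom "<SILENCE>" content i).map (fun k => (k : Int)) →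
    i ≤ s → s < content.length →
    (if scanFor "<SILENCE>" content s < content.length then
      ∃ hj : advanceJ E (s : Int) j < E.length,
        E[advanceJ E (s : Int) j] = (scanFor "<SILENCE>" content s : Int) ∧
        E.drop (advanceJ E (s : Int) j + 1) =
          (idxFrom "<SILENCE>" content (scanFor "<SILENCE>" content s + 1)).map (fun k => (k : Int))
    else E.length ≤ advanceJ E (s : Int) j) := by
  intro i j s hdrop his hslen
  rw [idxFrom_eq_scan] at hdrop
  by_cases hk : scanFor "<SILENCE>" content i < content.length
  · simp only [hk, if_pos, List.map_cons] at hdrop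
    set e := scanFor "<SILENCE>" content i with he
    have hei : i ≤ e := scanFor_ge _ _ _
    have hjlen : j < E.length := by
      by_contra hj
      rw [List.drop_eq_nil_of_le (by omega)] at hdrop
      exact absurd hdrop.symm (by simp)
    have hEj : E[j] = (e : Int) := by
      have h0 := List.drop_eq_getElem_cons hjlen
      rw [h0] at hdrop
      exact (List.cons_eq_cons.mp hdrop).1
    have hdrop1 : E.drop (j + 1) = (idxFrom "<SILENCE>" content (e + 1)).map (fun k => (k : Int)) := by
      have h0 := List.drop_eq_getElem_cons hjlen
      rw [h0] at hdrop
      exact (List.cons_eq_cons.mp hdrop).2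
    by_cases hes : e < s
    · -- skip this silence, recurse at i := e + 1
      have hstep := advanceJ_spec content E (e + 1) (j + 1) s hdrop1 (by omega) hslen
      rw [advanceJ, dif_pos hjlen, hEj, if_pos (show (e : Int) < (s : Int) by exact_mod_cast hes)]
      exact hstep
    · -- stop: e is the first silence ≥ s
      have hse : scanFor "<SILENCE>" content s = e :=
        scanFor_mono_eq _ _ i s his (by omega)
      rw [advanceJ, dif_pos hjlen, hEj,
        if_neg (show ¬ (e : Int) < (s : Int) by exact_mod_cast hes), hse,
        if_pos hk]
      exact ⟨hjlen, hEj, by rw [hdrop1]⟩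
  · -- no silence ≥ i at all, hence none ≥ s
    simp only [hk, if_false] at hdrop
    have hse : scanFor "<SILENCE>" content s = scanFor "<SILENCE>" content i :=
      scanFor_mono_eq _ _ i s his (by omega)
    have hj : E.length ≤ j := by
      have hlen := congrArg List.length hdrop
      simp [List.length_drop] at hlen
      omega
    rw [if_neg (by omega), advanceJ, dif_neg (by omega)]
    exact hj
termination_by i _ _ => content.length - i
decreasing_by
  have := scanFor_ge "<SILENCE>" content i
  omega

-- proof-only reference loop: the two-phase scan (start-find then end-find) over content
def locateKbLoopB (content : List String) (i : Nat)
    (starts ends : List Int) : List Int × List Int :=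
  if _hi : i < content.length then
    let j := scanFor "R_post_code" content i
    if _hj : j < content.length then
      let starts' := starts ++ [(j : Int)]
      let k := scanFor "<SILENCE>" content j
      if _hk : k < content.length then
        locateKbLoopB content (k + 1) starts' (ends ++ [(k : Int)])
      else
        (starts', ends)
    else
      (starts, ends)
  else
    (starts, ends)
termination_by content.length - i
decreasing_by
  have h1 := scanFor_ge "R_post_code" content i
  have h2 := scanFor_ge "<SILENCE>" content (scanFor "R_post_code" content i)
  omega

-- B's merge loop equals the two-phase scan
theorem pairLoop_eq_loopB (content : List String) (E : List Int) :
    ∀ (rem : List Int) (i0 i j : Nat) (starts ends : List Int),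
    rem = (idxFrom "R_post_code" content i0).map (fun k => (k : Int)) →
    i0 ≤ i → i ≤ content.length →
    E.drop j = (idxFrom "<SILENCE>" content i).map (fun k => (k : Int)) →
    pairLoop E rem (i : Int) j starts ends = locateKbLoopB content i starts ends := by
  intro rem
  induction rem with
  | nil =>
    intro i0 i j starts ends hrem h0i hilen hdrop
    rw [idxFrom_eq_scan] at hrem
    by_cases hs : scanFor "R_post_code" content i0 < content.length
    · simp [hs] at hrem
    · have hsi : scanFor "R_post_code" content i = scanFor "R_post_code" content i0 :=
        scanFor_mono_eq _ _ i0 i h0i (by omega)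
      rw [pairLoop, locateKbLoopB]
      by_cases hi : i < content.length
      · simp [hi, hsi, hs]
      · simp [hi]
  | cons s rest ih =>
    intro i0 i j starts ends hrem h0i hilen hdrop
    rw [idxFrom_eq_scan] at hrem
    by_cases hs : scanFor "R_post_code" content i0 < content.length
    · simp only [hs, if_pos] at hrem
      obtain ⟨hshead, hrest⟩ := List.cons_eq_cons.mp hrem
      set sN := scanFor "R_post_code" content i0 with hsN
      replace hshead : s = (sN : Int) := hshead
      subst hshead
      have hsge : i0 ≤ sN := scanFor_ge _ _ _
      by_cases hskip : sN < i
      · -- s < lo: skipped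
        rw [pairLoop,
          if_pos (show (sN : Int) < (i : Int) by exact_mod_cast hskip)]
        exact ih (sN + 1) i j starts ends hrest (by omega) hilen hdrop
      · -- s ≥ lo: record the start, then find the closing silence
        have hisN : i ≤ sN := by omega
        have hscan_i : scanFor "R_post_code" content i = sN :=
          scanFor_mono_eq _ _ i0 i h0i (by omega)
        have hilt : i < content.length := by omega
        rw [pairLoop, if_neg (show ¬ (sN : Int) < (i : Int) by exact_mod_cast hskip),
          locateKbLoopB]
        simp only [hilt, dif_pos, hscan_i, hs, dif_pos]
        have hadv := advanceJ_spec content E i j sN hdrop hisN hs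
        by_cases hk : scanFor "<SILENCE>" content sN < content.length
        · rw [if_pos hk] at hadv
          obtain ⟨hjlen, hEj, hdrop2⟩ := hadv
          set k := scanFor "<SILENCE>" content sN with hkdef
          rw [dif_pos hjlen, hEj, dif_pos hk]
          have hrec := ih (sN + 1) (k + 1) (advanceJ E (sN : Int) j + 1)
            (starts ++ [(sN : Int)]) (ends ++ [(k : Int)]) hrest
            (by have := scanFor_ge "<SILENCE>" content sN; omega) (by omega) hdrop2
          rw [show ((k : Int) + 1) = ((k + 1 : Nat) : Int) by push_cast; ring]
          exact hrec
        · rw [if_neg hk] at hadv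
          rw [dif_neg (by omega), dif_neg hk]
    · -- remaining list should be empty: contradiction
      simp [hs] at hrem

-- the original proof that A's flagged pass equals the two-phase scan
theorem loopB_skip {content : List String} {i : Nat} (hi : i < content.length)
    (hm : PySem.Str.isIn "R_post_code" content[i] = false) (starts ends : List Int) :
    locateKbLoopB content i starts ends = locateKbLoopB content (i + 1) starts ends := by
  have hj : scanFor "R_post_code" content i = scanFor "R_post_code" content (i + 1) :=
    scanFor_miss hi hm
  rw [locateKbLoopB, locateKbLoopB]
  simp only [hi, dif_pos, hj]
  by_cases h1 : i + 1 < content.length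
  · simp [h1]
  · have : scanFor "R_post_code" content (i + 1) = i + 1 := scanFor_stop h1
    simp [h1, this]

theorem loop_agree (content : List String) : ∀ m i starts ends, content.length - i ≤ m →
    ((locateKbLoopA (content.drop i) i false starts ends).2 =
      locateKbLoopB content i starts ends ∧
     (locateKbLoopA (content.drop i) i true starts ends).2 =
      (let k := scanFor "<SILENCE>" content i;
       if k < content.length then locateKbLoopB content (k + 1) starts (ends ++ [(k : Int)])
       else (starts, ends))) := by
  intro m
  induction m with
  | zero =>
    intro i starts ends hm
    have hi : ¬ i < content.length := by omega
    have hd : content.drop i = [] := List.drop_eq_nil_of_le (by omega)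
    constructor
    · rw [hd, locateKbLoopA, locateKbLoopB]; simp [hi]
    · rw [hd, locateKbLoopA]
      simp [scanFor_stop hi, hi]
  | succ m ih =>
    intro i starts ends hm
    by_cases hi : i < content.length
    · have hd : content.drop i = content[i] :: content.drop (i + 1) :=
        List.drop_eq_getElem_cons hi
      have hm' : content.length - (i + 1) ≤ m := by omega
      constructor
      · rw [hd, locateKbLoopA]
        by_cases hr : PySem.Str.isIn "R_post_code" content[i] = true
        · simp only [hr, Bool.not_false, Bool.and_self, if_pos]
          by_cases hs : PySem.Str.isIn "<SILENCE>" content[i] = true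
          · simp only [hs, if_true]
            rw [locateKbLoopB]
            simp only [dif_pos, scanFor_hit hi hr, scanFor_hit hi hs, hi]
            exact (ih (i + 1) (starts ++ [(i : Int)]) (ends ++ [(i : Int)]) hm').1
          · have hs0 : PySem.Str.isIn "<SILENCE>" content[i] = false := by simpa using hs
            simp only [hs0, Bool.false_eq_true, if_false]
            have h2 := (ih (i + 1) (starts ++ [(i : Int)]) ends hm').2
            rw [h2, locateKbLoopB]
            have hs' : PySem.Str.isIn "<SILENCE>" content[i] = false := by
              simpa using hs
            simp only [hi, dif_pos, scanFor_hit hi hr, scanFor_miss hi hs']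
            by_cases hk : scanFor "<SILENCE>" content (i + 1) < content.length
            · simp [hk]
            · simp [hk]
        · have hr' : PySem.Str.isIn "R_post_code" content[i] = false := by simpa using hr
          simp only [hr', Bool.false_and, Bool.false_eq_true, if_false]
          rw [loopB_skip hi hr']
          exact (ih (i + 1) starts ends hm').1
      · rw [hd, locateKbLoopA]
        simp only [Bool.not_true, Bool.and_false, Bool.false_eq_true, if_false]
        by_cases hs : PySem.Str.isIn "<SILENCE>" content[i] = true
        · simp only [hs, if_true]
          have h1 := (ih (i + 1) starts (ends ++ [(i : Int)]) hm').1
          simp only [scanFor_hit hi hs, hi, if_pos]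
          exact h1
        · have hs' : PySem.Str.isIn "<SILENCE>" content[i] = false := by simpa using hs
          simp only [hs', Bool.false_eq_true, if_false]
          rw [scanFor_miss hi hs']
          exact (ih (i + 1) starts ends hm').2
    · have hd : content.drop i = [] := List.drop_eq_nil_of_le (by omega)
      constructor
      · rw [hd, locateKbLoopA, locateKbLoopB]; simp [hi]
      · rw [hd, locateKbLoopA]
        simp [scanFor_stop hi, hi]

-- ===== VERDICT (by name: the statement is the Claim_ definition above) =====
theorem locate_kb_spec : Claim_equal_locate_kb := by
  intro content _
  unfold Spec_locate_kb locate_kb locate_kb_alt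
  have hA := (loop_agree content content.length 0 [] [] (by omega)).1
  simp only [List.drop_zero] at hA
  have hB := pairLoop_eq_loopB content (markerIdx "<SILENCE>" content)
    (markerIdx "R_post_code" content) 0 0 0 [] []
    (markerIdx_eq _ _) (le_refl 0) (by omega)
    (by simpa using markerIdx_eq "<SILENCE>" content)
  rw [show ((0 : Nat) : Int) = 0 by simp] at hB
  simp only [hA, hB]
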